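-- pv_equiv track=rewrite | github.com/rodomani/influencer-list-up | apify-scrapers/instagram/ingest_trending_instagram.py | looks_like_company
-- ===== SOURCE A (Python) =====
-- from typing import Any, Dict, List, Optional, Set, Tuple
--
-- def norm_text(s: Optional[str]) -> str:
--     return (s or "").strip().lower()
--
-- COMPANY_BIO_KEYWORDS = {
--     "official", "brand", "shop", "store", "customer service", "support", "press",
--     "pr", "sales", "shipping", "worldwide shipping", "order", "orders", "buy",
--     "discount", "promo", "promotion", "wholesale", "stockist",
--     "headquarters", "hq", "contact us", "email us", "business inquiries",
--     "corp", "corporation", "company", "inc", "ltd", "llc", "co.", "gmbh", "plc", "news"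
-- }
--
-- COMPANY_NAME_TOKENS = {
--     "inc", "ltd", "llc", "corp", "co", "company", "group", "official", "shop", "store",
--     "studio", "agency", "brand", "boutique", "restaurant", "hotel", "clinic", "news"
-- }
--
-- def looks_like_company(profile: Dict[str, Any]) -> bool:
--     username = norm_text(profile.get("username"))
--     full_name = norm_text(profile.get("full_name"))
--     bio = norm_text(profile.get("biography"))
--
--     for tok in COMPANY_NAME_TOKENS:
--         if f" {tok} " in f" {full_name} " or f" {tok} " in f" {username} ":
--             return True
--
--     for kw in COMPANY_BIO_KEYWORDS:
--         if kw in bio: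
--             return True
--
--     if "link in bio" in bio and ("shop" in bio or "order" in bio or "discount" in bio):
--         return True
--
--     return False
-- ===== SOURCE B (Python) =====
-- from typing import Any, Dict, Optional
--
-- def norm_text(s: Optional[str]) -> str:
--     return (s or "").strip().lower()
--
-- COMPANY_BIO_KEYWORDS = {
--     "official", "brand", "shop", "store", "customer service", "support", "press",
--     "pr", "sales", "shipping", "worldwide shipping", "order", "orders", "buy",
--     "discount", "promo", "promotion", "wholesale", "stockist",
--     "headquarters", "hq", "contact us", "email us", "business inquiries",
--     "corp", "corporation", "company", "inc", "ltd", "llc", "co.", "gmbh", "plc", "news"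
-- }
--
-- COMPANY_NAME_TOKENS = {
--     "inc", "ltd", "llc", "corp", "co", "company", "group", "official", "shop", "store",
--     "studio", "agency", "brand", "boutique", "restaurant", "hotel", "clinic", "news"
-- }
--
-- def looks_like_company(profile: Dict[str, Any]) -> bool:
--     username = norm_text(profile.get("username"))
--     full_name = norm_text(profile.get("full_name"))
--     bio = norm_text(profile.get("biography"))
--
--     # tokenize once (split on single spaces = the padded-substring semantics) and intersect
--     name_words = set(full_name.split(' ')) | set(username.split(' '))
--     if COMPANY_NAME_TOKENS & name_words:
--         return True
--
--     if any(kw in bio for kw in COMPANY_BIO_KEYWORDS):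
--         return True
--
--     return "link in bio" in bio and ("shop" in bio or "order" in bio or "discount" in bio)
-- ===== Notes on version B (the rewrite author's own statement) =====
-- stated objective: idiomatic
-- what changed: The per-token padded-substring scans over the name and username are replaced by tokenizing both once with split(' ') into a word set and testing COMPANY_NAME_TOKENS by set intersection; the bio loop becomes an any() over substring tests.
import Mathlib
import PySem

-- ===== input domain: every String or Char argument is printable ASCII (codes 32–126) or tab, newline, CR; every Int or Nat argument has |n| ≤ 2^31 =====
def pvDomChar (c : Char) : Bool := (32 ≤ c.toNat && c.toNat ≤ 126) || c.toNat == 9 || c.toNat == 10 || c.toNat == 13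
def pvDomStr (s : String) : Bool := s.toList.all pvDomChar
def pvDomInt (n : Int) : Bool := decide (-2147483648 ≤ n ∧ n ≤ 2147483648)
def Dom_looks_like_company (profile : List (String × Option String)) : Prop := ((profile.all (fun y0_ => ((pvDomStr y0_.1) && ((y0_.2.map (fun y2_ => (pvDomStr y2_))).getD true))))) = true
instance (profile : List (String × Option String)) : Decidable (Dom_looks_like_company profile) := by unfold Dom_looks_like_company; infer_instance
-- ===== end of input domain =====

-- B replaces A's per-token padded-substring scans of name/username with one split(' ') tokenization
-- plus a set intersection against COMPANY_NAME_TOKENS (idiomatic); the bio part stays a substring scan.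

-- shared module context (norm_text and the two constant sets of the Python module, used by both programs)
def pvNormText (s : Option String) : String :=
  PySem.Str.lower (PySem.Str.strip (s.getD ""))

def pvGetField (profile : List (String × Option String)) (k : String) : Option String :=
  ((PySem.Dict.mk profile).get? k).join

def pvCompanyNameTokens : List String :=
  ["inc", "ltd", "llc", "corp", "co", "company", "group", "official", "shop", "store",
   "studio", "agency", "brand", "boutique", "restaurant", "hotel", "clinic", "news"]

def pvCompanyBioKeywords : List String :=
  ["official", "brand", "shop", "store", "customer service", "support", "press",
   "pr", "sales", "shipping", "worldwide shipping", "order", "orders", "buy",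
   "discount", "promo", "promotion", "wholesale", "stockist",
   "headquarters", "hq", "contact us", "email us", "business inquiries",
   "corp", "corporation", "company", "inc", "ltd", "llc", "co.", "gmbh", "plc", "news"]

-- ===== PORT A =====
-- the first for-loop of A: early return True on a padded-substring hit
def pvTokenLoop : List String → String → String → Bool
  | [], _, _ => false
  | t :: ts, full_name, username =>
    if PySem.Str.isIn (" " ++ t ++ " ") (" " ++ full_name ++ " ") ||
       PySem.Str.isIn (" " ++ t ++ " ") (" " ++ username ++ " ") then true
    else pvTokenLoop ts full_name username

-- the second for-loop of A: early return True on a bio-keyword hit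
def pvBioLoop : List String → String → Bool
  | [], _ => false
  | kw :: kws, bio => if PySem.Str.isIn kw bio then true else pvBioLoop kws bio

def looks_like_company (profile : List (String × Option String)) : Bool :=
  let username := pvNormText (pvGetField profile "username")
  let full_name := pvNormText (pvGetField profile "full_name")
  let bio := pvNormText (pvGetField profile "biography")
  if pvTokenLoop pvCompanyNameTokens full_name username then true
  else if pvBioLoop pvCompanyBioKeywords bio then true
  else if PySem.Str.isIn "link in bio" bio &&
          (PySem.Str.isIn "shop" bio || PySem.Str.isIn "order" bio || PySem.Str.isIn "discount" bio)
       then true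
  else false

-- ===== PORT B =====
def looks_like_company_alt (profile : List (String × Option String)) : Bool :=
  let username := pvNormText (pvGetField profile "username")
  let full_name := pvNormText (pvGetField profile "full_name")
  let bio := pvNormText (pvGetField profile "biography")
  let name_words : PySem.Set (List Char) :=
    (PySem.Set.ofList (PySem.Chars.splitOn full_name.toList [' '])).union
      (PySem.Set.ofList (PySem.Chars.splitOn username.toList [' ']))
  if !((PySem.Set.ofList (pvCompanyNameTokens.map String.toList)).inter name_words).isEmpty then true
  else if pvCompanyBioKeywords.any (fun kw => PySem.Str.isIn kw bio) then true
  else PySem.Str.isIn "link in bio" bio &&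
       (PySem.Str.isIn "shop" bio || PySem.Str.isIn "order" bio || PySem.Str.isIn "discount" bio)

-- ===== PRECONDITION & SPEC =====
def Spec_looks_like_company (profile : List (String × Option String)) (out : Bool) : Prop := out = looks_like_company_alt profile
instance (profile : List (String × Option String)) (out : Bool) : Decidable (Spec_looks_like_company profile out) := by unfold Spec_looks_like_company; infer_instance

-- ===== CLAIM (what is proved, stated in full; the proofs are below) =====
def Claim_equal_looks_like_company : Prop := ∀ (profile : List (String × Option String)), Dom_looks_like_company profile → Spec_looks_like_company profile (looks_like_company profile)

-- ===== LEMMAS AND PROOFS =====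

-- pure (fuel-free, accumulator-free) form of PySem.Chars.splitOn on the single-space separator
def pvW : List Char → List Char → List (List Char)
  | [], cur => [cur.reverse]
  | c :: rest, cur => if c = ' ' then cur.reverse :: pvW rest [] else pvW rest (c :: cur)

-- joins words back with single spaces, padded with a leading and trailing space
def pvJ : List (List Char) → List Char
  | [] => [' ']
  | w :: ws => ' ' :: (w ++ pvJ ws)

theorem pv_go_eq : ∀ (l : List Char) (fuel : Nat) (cur : List Char) (acc : List (List Char)),
    l.length ≤ fuel →
    PySem.Chars.splitOn.go [' '] fuel l cur acc = acc.reverse ++ pvW l cur := by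
  intro l
  induction l with
  | nil =>
    intro fuel cur acc h
    cases fuel with
    | zero => simp [PySem.Chars.splitOn.go, pvW]
    | succ n => simp [PySem.Chars.splitOn.go, pvW]
  | cons c rest ih =>
    intro fuel cur acc h
    cases fuel with
    | zero => simp at h
    | succ n =>
      rw [PySem.Chars.splitOn.go]
      have hp : ([' '].isPrefixOf (c :: rest)) = (' ' == c) := by simp [List.isPrefixOf]
      rw [hp]
      by_cases hc : c = ' '
      · subst hc
        simp only [BEq.rfl, if_pos, List.length_cons, List.length_nil, List.drop_succ_cons,
          List.drop_zero]
        rw [ih n [] (cur.reverse :: acc) (by simpa using Nat.le_of_succ_le_succ h)]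
        simp [pvW]
      · have : (' ' == c) = false := by simp [Ne.symm hc]
        rw [this]
        simp only [if_neg Bool.false_ne_true]
        rw [ih n (c :: cur) acc (by simpa using Nat.le_of_succ_le_succ h)]
        simp [pvW, hc]

theorem pv_splitOn_eq_W (cs : List Char) : PySem.Chars.splitOn cs [' '] = pvW cs [] := by
  rw [PySem.Chars.splitOn]
  rw [pv_go_eq cs (cs.length + 1) [] [] (by omega)]
  simp

theorem pv_J_W : ∀ (l cur : List Char), pvJ (pvW l cur) = ' ' :: (cur.reverse ++ l ++ [' ']) := by
  intro l
  induction l with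
  | nil => intro cur; simp [pvW, pvJ]
  | cons c rest ih =>
    intro cur
    by_cases hc : c = ' '
    · subst hc; simp [pvW, pvJ, ih]
    · simp [pvW, hc, ih]

theorem pv_W_spacefree : ∀ (l cur : List Char), ' ' ∉ cur → ∀ w ∈ pvW l cur, ' ' ∉ w := by
  intro l
  induction l with
  | nil => intro cur hc w hw; simp [pvW] at hw; subst hw; simpa using hc
  | cons c rest ih =>
    intro cur hc w hw
    by_cases h : c = ' '
    · subst h; simp [pvW] at hw
      rcases hw with h1 | h1
      · subst h1; simpa using hc
      · exact ih [] (by simp) w h1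
    · simp [pvW, h] at hw
      exact ih (c :: cur) (by simp [hc, Ne.symm h]) w hw

theorem pv_J_head : ∀ (ws : List (List Char)), ∃ r, pvJ ws = ' ' :: r := by
  intro ws; cases ws <;> simp [pvJ]

theorem pv_cancel : ∀ (a b u v : List Char), ' ' ∉ a → ' ' ∉ b →
    a ++ ' ' :: u = b ++ ' ' :: v → a = b := by
  intro a
  induction a with
  | nil =>
    intro b u v _ hb he
    cases b with
    | nil => rfl
    | cons d b' => simp at he; exfalso; exact hb (by simp [← he.1])
  | cons c a' ih =>
    intro b u v ha hb he
    cases b with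
    | nil => simp at he; exfalso; exact ha (by simp [he.1])
    | cons d b' =>
      simp at he
      have := ih b' u v (by intro h; exact ha (by simp [h])) (by intro h; exact hb (by simp [h])) he.2
      simp [he.1, this]

theorem pv_locate : ∀ (w s' rest t' : List Char), ' ' ∉ w →
    w ++ rest = s' ++ ' ' :: t' → ∃ s'', s' = w ++ s'' := by
  intro w
  induction w with
  | nil => intro s' rest t' _ _; exact ⟨s', by simp⟩
  | cons c w' ih =>
    intro s' rest t' hw he
    cases s' with
    | nil => simp at he; exfalso; exact hw (by simp [he.1])
    | cons d s₂ =>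
      simp at he
      obtain ⟨s'', hs⟩ := ih s₂ rest t' (by intro h; exact hw (by simp [h])) he.2
      exact ⟨s'', by simp [← he.1, hs]⟩

theorem pv_main : ∀ (ws : List (List Char)) (tok : List Char), ' ' ∉ tok →
    (∀ w ∈ ws, ' ' ∉ w) →
    ((' ' :: (tok ++ [' '])) <:+: pvJ ws ↔ tok ∈ ws) := by
  intro ws
  induction ws with
  | nil =>
    intro tok _ _
    simp only [pvJ, List.not_mem_nil, iff_false]
    intro h
    have := h.length_le
    simp at this
  | cons w ws ih =>
    intro tok htok hws
    constructor
    · rintro ⟨s, t, hst⟩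
      simp only [pvJ] at hst
      cases s with
      | nil =>
        simp at hst
        obtain ⟨r, hr⟩ := pv_J_head ws
        rw [hr] at hst
        have h2 : tok ++ ' ' :: t = w ++ ' ' :: r := by
          simpa [List.append_assoc] using hst
        have : tok = w := pv_cancel tok w t r htok (hws w (by simp)) h2
        simp [this]
      | cons c s' =>
        simp only [List.cons_append, List.cons.injEq] at hst
        have h2 : w ++ pvJ ws = s' ++ ' ' :: (tok ++ [' '] ++ t) := by
          rw [← hst.2]; simp [List.append_assoc]
        obtain ⟨s'', hs⟩ := pv_locate w s' (pvJ ws) (tok ++ [' '] ++ t) (hws w (by simp)) h2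
        have h3 : pvJ ws = s'' ++ (' ' :: (tok ++ [' '])) ++ t := by
          rw [hs] at h2
          have := (List.append_right_injective w) (by simpa [List.append_assoc] using h2)
          simpa [List.append_assoc] using this
        have : tok ∈ ws := (ih tok htok (fun u hu => hws u (by simp [hu]))).mp ⟨s'', t, h3.symm⟩
        simp [this]
    · intro hmem
      rcases List.mem_cons.mp hmem with he | hmem'
      · subst he
        obtain ⟨r, hr⟩ := pv_J_head ws
        exact ⟨[], r, by simp [pvJ, hr]⟩
      · have h1 := (ih tok htok (fun u hu => hws u (by simp [hu]))).mpr hmem'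
        have h2 : pvJ ws <:+: pvJ (w :: ws) := ⟨' ' :: w, [], by simp [pvJ]⟩
        exact h1.trans h2

theorem pv_padded_iff (t s : String) (ht : ' ' ∉ t.toList) :
    PySem.Str.isIn (" " ++ t ++ " ") (" " ++ s ++ " ") = true ↔
      t.toList ∈ PySem.Chars.splitOn s.toList [' '] := by
  rw [PySem.Str.isIn_iff_infix]
  have hpat : (" " ++ t ++ " ").toList = ' ' :: (t.toList ++ [' ']) := by
    simp [String.toList_append]
  have hhay : (" " ++ s ++ " ").toList = pvJ (pvW s.toList []) := by
    rw [pv_J_W]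
    simp [String.toList_append]
  rw [hpat, hhay, pv_splitOn_eq_W]
  exact pv_main (pvW s.toList []) t.toList ht (pv_W_spacefree s.toList [] (by simp))

theorem pv_tokens_spacefree : ∀ t ∈ pvCompanyNameTokens, ' ' ∉ t.toList := by decide

theorem pv_tokenLoop_eq_any (ts : List String) (fn un : String) :
    pvTokenLoop ts fn un =
      ts.any (fun t => PySem.Str.isIn (" " ++ t ++ " ") (" " ++ fn ++ " ") ||
                       PySem.Str.isIn (" " ++ t ++ " ") (" " ++ un ++ " ")) := by
  induction ts with
  | nil => simp [pvTokenLoop]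
  | cons t ts ih =>
    cases h : (PySem.Str.isIn (" " ++ t ++ " ") (" " ++ fn ++ " ") ||
               PySem.Str.isIn (" " ++ t ++ " ") (" " ++ un ++ " ")) with
    | true => simp only [pvTokenLoop, List.any_cons]; rw [h]; rfl
    | false => simp only [pvTokenLoop, List.any_cons]; rw [h]; exact ih

theorem pv_bioLoop_eq_any (kws : List String) (bio : String) :
    pvBioLoop kws bio = kws.any (fun kw => PySem.Str.isIn kw bio) := by
  induction kws with
  | nil => simp [pvBioLoop]
  | cons kw kws ih =>
    cases h : PySem.Str.isIn kw bio with
    | true => simp only [pvBioLoop, List.any_cons]; rw [h]; rfl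
    | false => simp only [pvBioLoop, List.any_cons]; rw [h]; exact ih

theorem pv_flag_eq (fn un : String) :
    pvTokenLoop pvCompanyNameTokens fn un =
      !((PySem.Set.ofList (pvCompanyNameTokens.map String.toList)).inter
          ((PySem.Set.ofList (PySem.Chars.splitOn fn.toList [' '])).union
            (PySem.Set.ofList (PySem.Chars.splitOn un.toList [' '])))).isEmpty := by
  rw [pv_tokenLoop_eq_any, Bool.eq_iff_iff]
  rw [List.any_eq_true]
  constructor
  · rintro ⟨t, ht, hor⟩
    have hsf := pv_tokens_spacefree t ht
    have hmem : t.toList ∈ PySem.Chars.splitOn fn.toList [' '] ∨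
        t.toList ∈ PySem.Chars.splitOn un.toList [' '] := by
      rcases Bool.or_eq_true_iff.mp hor with h | h
      · exact Or.inl ((pv_padded_iff t fn hsf).mp h)
      · exact Or.inr ((pv_padded_iff t un hsf).mp h)
    have hin : t.toList ∈ (PySem.Set.ofList (pvCompanyNameTokens.map String.toList)).inter
        ((PySem.Set.ofList (PySem.Chars.splitOn fn.toList [' '])).union
          (PySem.Set.ofList (PySem.Chars.splitOn un.toList [' ']))) := by
      rw [PySem.Set.mem_inter]
      refine ⟨(PySem.Set.mem_ofList _ _).mpr (List.mem_map_of_mem ht), ?_⟩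
      rw [PySem.Set.mem_union]
      rcases hmem with h | h
      · exact Or.inl ((PySem.Set.mem_ofList _ _).mpr h)
      · exact Or.inr ((PySem.Set.mem_ofList _ _).mpr h)
    simp only [Bool.not_eq_true']
    rw [List.isEmpty_eq_false_iff_exists_mem]
    exact ⟨t.toList, hin⟩
  · intro h
    simp only [Bool.not_eq_true'] at h
    rw [List.isEmpty_eq_false_iff_exists_mem] at h
    obtain ⟨x, hx⟩ := h
    rw [PySem.Set.mem_inter] at hx
    obtain ⟨hx1, hx2⟩ := hx
    rw [PySem.Set.mem_ofList] at hx1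
    obtain ⟨t, ht, rfl⟩ := List.mem_map.mp hx1
    have hsf := pv_tokens_spacefree t ht
    rw [PySem.Set.mem_union, PySem.Set.mem_ofList, PySem.Set.mem_ofList] at hx2
    refine ⟨t, ht, Bool.or_eq_true_iff.mpr ?_⟩
    rcases hx2 with h | h
    · exact Or.inl ((pv_padded_iff t fn hsf).mpr h)
    · exact Or.inr ((pv_padded_iff t un hsf).mpr h)

-- ===== VERDICT (by name: the statement is the Claim_ definition above) =====
theorem looks_like_company_spec : Claim_equal_looks_like_company := by
  intro profile _
  unfold Spec_looks_like_company
  simp only [looks_like_company, looks_like_company_alt]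
  rw [pv_flag_eq, pv_bioLoop_eq_any]
  cases (!((PySem.Set.ofList (pvCompanyNameTokens.map String.toList)).inter
      ((PySem.Set.ofList (PySem.Chars.splitOn (pvNormText (pvGetField profile "full_name")).toList [' '])).union
        (PySem.Set.ofList (PySem.Chars.splitOn (pvNormText (pvGetField profile "username")).toList [' '])))).isEmpty) <;>
    cases pvCompanyBioKeywords.any (fun kw => PySem.Str.isIn kw (pvNormText (pvGetField profile "biography"))) <;>
    simp
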